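-- pv_equiv track=rewrite | github.com/pirl-unc/mhcseqs | mhcseqs/groove.py | find_cys_pairs
-- ===== SOURCE A (Python) =====
-- from typing import Optional, Sequence
--
-- IG_SEP_MIN = 48
--
-- IG_SEP_MAX = 72
--
-- def _clean_seq(sequence: Optional[str]) -> str:
--     return "".join(ch for ch in str(sequence or "").strip().upper() if not ch.isspace())
--
-- def find_cys_pairs(
--     seq: str,
--     min_sep: int = IG_SEP_MIN,
--     max_sep: int = IG_SEP_MAX,
-- ) -> list[tuple[int, int, int]]:
--     """Find all Cys-Cys pairs with plausible Ig-fold separation.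
--
--     Returns list of (cys1_pos, cys2_pos, separation) tuples.
--     """
--     cleaned = _clean_seq(seq)
--     cys_positions = [idx for idx, aa in enumerate(cleaned) if aa == "C"]
--     pairs: list[tuple[int, int, int]] = []
--     for i, c1 in enumerate(cys_positions):
--         for c2 in cys_positions[i + 1 :]:
--             sep = c2 - c1
--             if sep < min_sep:
--                 continue
--             if sep > max_sep:
--                 break
--             pairs.append((c1, c2, sep))
--     return pairs
-- ===== SOURCE B (Python) =====
-- IG_SEP_MIN = 48
--
-- IG_SEP_MAX = 72
--
--
-- def _clean_seq(sequence):
--     return "".join(ch for ch in str(sequence or "").strip().upper() if not ch.isspace())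
--
--
-- def find_cys_pairs(seq, min_sep=IG_SEP_MIN, max_sep=IG_SEP_MAX):
--     """Two-pointer sliding window over the sorted Cys positions: lo and hi
--     advance monotonically across the outer loop instead of rescanning each tail."""
--     cleaned = _clean_seq(seq)
--     pos = [idx for idx, aa in enumerate(cleaned) if aa == "C"]
--     n = len(pos)
--     pairs = []
--     lo = 0
--     hi = 0
--     for i, c1 in enumerate(pos):
--         while lo < n and pos[lo] < c1 + min_sep:
--             lo += 1
--         while hi < n and pos[hi] <= c1 + max_sep:
--             hi += 1
--         for j in range(max(lo, i + 1), hi):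
--             c2 = pos[j]
--             pairs.append((c1, c2, c2 - c1))
--     return pairs
-- ===== Notes on version B (the rewrite author's own statement) =====
-- stated objective: faster
-- what changed: A rescans each tail with continue below min_sep and break above max_sep; B keeps two monotone pointers (a sliding window) over the sorted Cys-position list, advancing lo past positions < c1+min_sep and hi past positions <= c1+max_sep once per outer step and emitting pos[max(lo,i+1):hi] directly.
import Mathlib
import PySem

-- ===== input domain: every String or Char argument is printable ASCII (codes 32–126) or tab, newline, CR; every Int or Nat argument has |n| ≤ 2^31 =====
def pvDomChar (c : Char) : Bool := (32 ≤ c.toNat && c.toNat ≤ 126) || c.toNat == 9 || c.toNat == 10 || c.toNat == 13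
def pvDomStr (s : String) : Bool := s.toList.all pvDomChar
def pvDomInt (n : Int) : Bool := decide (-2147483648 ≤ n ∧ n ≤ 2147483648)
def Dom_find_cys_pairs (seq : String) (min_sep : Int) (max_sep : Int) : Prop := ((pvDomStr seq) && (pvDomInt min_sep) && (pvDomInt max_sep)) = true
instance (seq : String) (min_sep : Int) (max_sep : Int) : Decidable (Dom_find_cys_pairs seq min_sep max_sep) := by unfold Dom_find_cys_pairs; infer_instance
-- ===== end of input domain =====

-- B replaces A's rescan of each tail (skip-then-break) by one sliding window: two pointers that only move
-- forward across the whole outer loop (objective: faster; same output, order included).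

-- ===== PORT A =====
-- _clean_seq, shared verbatim by both Pythons ("seq or ''" is the identity on str inputs)
def clean_seq (sequence : String) : String :=
  String.ofList ((PySem.Str.upper (PySem.Str.strip sequence)).toList.filter (fun ch => !(PySem.Chars.isspace ch)))

-- [idx for idx, aa in enumerate(cleaned) if aa == "C"], shared verbatim by both Pythons
def cys_positions (cleaned : String) : List Int :=
  ((PySem.List.enumerate cleaned.toList 0).filter (fun p => p.2 == 'C')).map (fun p => p.1)

-- A's inner loop: continue below min_sep, break above max_sep, else append
def innerA (c1 min_sep max_sep : Int) : List Int → List (Int × Int × Int)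
  | [] => []
  | c2 :: rest =>
    if c2 - c1 < min_sep then innerA c1 min_sep max_sep rest
    else if max_sep < c2 - c1 then []
    else (c1, c2, c2 - c1) :: innerA c1 min_sep max_sep rest

def find_cys_pairs (seq : String) (min_sep : Int) (max_sep : Int) : List (Int × Int × Int) :=
  let cys := cys_positions (clean_seq seq)
  (PySem.List.enumerate cys 0).foldl
    (fun pairs p => pairs ++ innerA p.2 min_sep max_sep (PySem.List.slice cys (some (p.1 + 1)) none)) []

-- ===== PORT B =====
-- while lo < n and p(pos[lo]): lo += 1
def advanceWhile (pos : List Int) (p : Int → Bool) (k : Nat) : Nat :=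
  if h : k < pos.length then
    if p pos[k] then advanceWhile pos p (k + 1) else k
  else k
termination_by pos.length - k

def find_cys_pairs_alt (seq : String) (min_sep : Int) (max_sep : Int) : List (Int × Int × Int) :=
  let pos := cys_positions (clean_seq seq)
  ((pos.zipIdx).foldl
    (fun (st : Nat × Nat × List (Int × Int × Int)) q =>
      let c1 := q.1
      let i := q.2
      let lo := advanceWhile pos (fun x => decide (x < c1 + min_sep)) st.1
      let hi := advanceWhile pos (fun x => decide (x ≤ c1 + max_sep)) st.2.1
      (lo, hi, st.2.2 ++ (List.range' (max lo (i + 1)) (hi - max lo (i + 1))).map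
          (fun j => (c1, pos.getD j 0, pos.getD j 0 - c1))))
    (0, 0, [])).2.2

-- ===== PRECONDITION & SPEC =====
def Spec_find_cys_pairs (seq : String) (min_sep : Int) (max_sep : Int) (out : List (Int × Int × Int)) : Prop := out = find_cys_pairs_alt seq min_sep max_sep
instance (seq : String) (min_sep : Int) (max_sep : Int) (out : List (Int × Int × Int)) : Decidable (Spec_find_cys_pairs seq min_sep max_sep out) := by unfold Spec_find_cys_pairs; infer_instance

-- ===== CLAIM (what is proved, stated in full; the proofs are below) =====
def Claim_equal_find_cys_pairs : Prop := ∀ (seq : String) (min_sep : Int) (max_sep : Int), Dom_find_cys_pairs seq min_sep max_sep → Spec_find_cys_pairs seq min_sep max_sep (find_cys_pairs seq min_sep max_sep)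

-- ===== LEMMAS AND PROOFS =====

-- the common value both ports compute for outer index i with c1 = pos[i]
def emitAt (l : List Int) (min_sep max_sep : Int) (i : Nat) (c1 : Int) : List (Int × Int × Int) :=
  ((l.drop (i + 1)).filter (fun x => !(decide (x < c1 + min_sep)) && decide (x ≤ c1 + max_sep))).map
    (fun x => (c1, x, x - c1))

-- a predicate true on a downward-closed set of Ints
def DownClosed (p : Int → Bool) : Prop := ∀ x y : Int, x ≤ y → p y = true → p x = true

lemma downClosed_lt (v : Int) : DownClosed (fun x => decide (x < v)) := by
  intro x y hxy h; simp at h ⊢; omega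

lemma downClosed_le (v : Int) : DownClosed (fun x => decide (x ≤ v)) := by
  intro x y hxy h; simp at h ⊢; omega

lemma down_all_false {p : Int → Bool} (hp : DownClosed p) {a : Int} {t : List Int}
    (hs : (a :: t).Pairwise (· ≤ ·)) (ha : p a = false) : ∀ x ∈ t, p x = false := by
  intro x hx
  rcases List.pairwise_cons.mp hs with ⟨hall, _⟩
  by_contra h
  have := hp a x (hall x hx) (by revert h; cases p x <;> simp)
  simp [this] at ha

lemma countP_take_sorted {p : Int → Bool} (hp : DownClosed p) :
    ∀ (l : List Int), l.Pairwise (· ≤ ·) → ∀ m : Nat,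
      (l.take m).countP p = min (l.countP p) m := by
  intro l
  induction l with
  | nil => intro _ m; simp
  | cons a t ih =>
    intro hs m
    have hst := List.Pairwise.of_cons hs
    cases m with
    | zero => simp
    | succ m =>
      rw [List.take_succ_cons]
      have hih := ih hst m
      by_cases ha : p a = true
      · have h1 : (a :: (t.take m)).countP p = (t.take m).countP p + 1 := by
          rw [List.countP_cons, ha]; simp
        have h2 : (a :: t).countP p = t.countP p + 1 := by
          rw [List.countP_cons, ha]; simp
        rw [h1, h2]
        omega
      · have ha' : p a = false := by revert ha; cases p a <;> simp
        have hz : t.countP p = 0 := List.countP_eq_zero.mpr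
          (fun x hx => by simp [down_all_false hp hs ha' x hx])
        have hz2 : (t.take m).countP p = 0 := List.countP_eq_zero.mpr
          (fun x hx => by simp [down_all_false hp hs ha' x (List.mem_of_mem_take hx)])
        have h1 : (a :: (t.take m)).countP p = (t.take m).countP p := by
          rw [List.countP_cons, ha']; simp
        have h2 : (a :: t).countP p = t.countP p := by
          rw [List.countP_cons, ha']; simp
        rw [h1, h2]
        omega

lemma countP_drop_sorted {p : Int → Bool} (hp : DownClosed p)
    (l : List Int) (hs : l.Pairwise (· ≤ ·)) (m : Nat) :
    (l.drop m).countP p = l.countP p - m := by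
  have h : ((l.take m) ++ (l.drop m)).countP p = (l.take m).countP p + (l.drop m).countP p :=
    List.countP_append ..
  rw [List.take_append_drop] at h
  have h2 := countP_take_sorted hp l hs m
  have h3 : m ≤ l.length ∨ l.length < m := le_or_gt m l.length
  have h4 := l.countP_le_length (p := p)
  omega

lemma getElem_p_iff {p : Int → Bool} (hp : DownClosed p) :
    ∀ (l : List Int), l.Pairwise (· ≤ ·) → ∀ (j : Nat) (hj : j < l.length),
      (p l[j] = true ↔ j < l.countP p) := by
  intro l
  induction l with
  | nil => intro _ j hj; simp at hj
  | cons a t ih =>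
    intro hs j hj
    have hst := List.Pairwise.of_cons hs
    cases j with
    | zero =>
      simp only [List.getElem_cons_zero, List.countP_cons]
      by_cases ha : p a = true
      · simp [ha]
      · have ha' : p a = false := by revert ha; cases p a <;> simp
        have hz : t.countP p = 0 := List.countP_eq_zero.mpr
          (fun x hx => by simp [down_all_false hp hs ha' x hx])
        simp [ha', hz]
    | succ j =>
      have hj' : j < t.length := by simpa using hj
      simp only [List.getElem_cons_succ, List.countP_cons]
      by_cases ha : p a = true
      · rw [ih hst j hj']
        simp [ha]
      · have ha' : p a = false := by revert ha; cases p a <;> simp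
        have hz : t.countP p = 0 := List.countP_eq_zero.mpr
          (fun x hx => by simp [down_all_false hp hs ha' x hx])
        have hx : p t[j] = false :=
          down_all_false hp hs ha' _ (List.getElem_mem hj')
        simp [ha', hz, hx]

lemma advanceWhile_eq_countP {p : Int → Bool} (hp : DownClosed p)
    (l : List Int) (hs : l.Pairwise (· ≤ ·)) :
    ∀ k : Nat, k ≤ l.countP p → advanceWhile l p k = l.countP p := by
  intro k
  induction hk : l.length - k using Nat.strong_induction_on generalizing k with
  | _ n ih =>
    intro hkc
    rw [advanceWhile]
    by_cases h : k < l.length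
    · simp only [h, dif_pos]
      rcases Nat.lt_or_ge k (l.countP p) with hlt | hge
      · have hpk : p l[k] = true := (getElem_p_iff hp l hs k h).mpr hlt
        rw [hpk]
        simp only [if_true]
        subst hk
        exact ih (l.length - (k+1)) (by omega) (k+1) rfl hlt
      · have hk' : k = l.countP p := le_antisymm hkc hge
        have hiff := getElem_p_iff hp l hs k h
        have hpk : p l[k] = false := by
          cases hpe : p l[k]
          · rfl
          · exact absurd (hiff.mp hpe) (by omega)
        rw [hpk]
        simp only [Bool.false_eq_true, if_false]
        omega
    · simp only [h, dif_neg, not_false_iff]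
      have := l.countP_le_length (p := p)
      omega

lemma filter_and_eq_take_drop {p q : Int → Bool} (hp : DownClosed p) (hq : DownClosed q) :
    ∀ (l : List Int), l.Pairwise (· ≤ ·) →
      l.filter (fun x => !(p x) && q x) =
        (l.take (l.countP q)).drop (min (l.countP p) (l.countP q)) := by
  intro l
  induction l with
  | nil => simp
  | cons a t ih =>
    intro hs
    have hst := List.Pairwise.of_cons hs
    by_cases hqa : q a = true
    · have hcq : (a :: t).countP q = t.countP q + 1 := by
        rw [List.countP_cons, hqa]; simp
      by_cases hpa : p a = true
      · have hcp : (a :: t).countP p = t.countP p + 1 := by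
          rw [List.countP_cons, hpa]; simp
        rw [List.filter_cons, if_neg (by simp [hpa]), hcq, hcp, ih hst]
        rw [List.take_succ_cons]
        simp [Nat.succ_min_succ]
      · have hpa' : p a = false := by revert hpa; cases p a <;> simp
        have hzp : t.countP p = 0 := List.countP_eq_zero.mpr
          (fun x hx => by simp [down_all_false hp hs hpa' x hx])
        have hcp : (a :: t).countP p = 0 := by
          rw [List.countP_cons, hpa', hzp]; simp
        rw [List.filter_cons, if_pos (by simp [hpa', hqa]), hcq, hcp, ih hst, hzp]
        simp [List.take_succ_cons]
    · have hqa' : q a = false := by revert hqa; cases q a <;> simp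
      have hzq : t.countP q = 0 := List.countP_eq_zero.mpr
        (fun x hx => by simp [down_all_false hq hs hqa' x hx])
      have hfe : (a :: t).filter (fun x => !(p x) && q x) = [] := by
        rw [List.filter_eq_nil_iff]
        intro x hx
        rcases List.mem_cons.mp hx with rfl | hxt
        · simp [hqa']
        · simp [down_all_false hq hs hqa' x hxt]
      have hcq : (a :: t).countP q = 0 := by
        rw [List.countP_cons, hqa', hzq]; simp
      rw [hfe, hcq]
      simp

lemma map_getD_range' (l : List Int) :
    ∀ (c s : Nat), s + c ≤ l.length →
      (List.range' s c).map (fun j => l.getD j 0) = (l.take (s + c)).drop s := by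
  intro c
  induction c with
  | zero =>
    intro s h
    have hlen : (l.take (s + 0)).length ≤ s := by
      rw [List.length_take]; omega
    rw [List.drop_eq_nil_of_le hlen]
    simp
  | succ c ih =>
    intro s h
    rw [List.range'_succ, List.map_cons, ih (s+1) (by omega)]
    have hs : s < l.length := by omega
    have h1 : l.getD s 0 = l[s] := List.getD_eq_getElem l 0 hs
    have h2 : (l.take (s + (c+1))).drop s = l[s] :: (l.take (s + 1 + c)).drop (s+1) := by
      apply List.ext_getElem
      · simp; omega
      · intro n h3 h4
        simp only [List.getElem_drop, List.getElem_take]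
        cases n with
        | zero => simp
        | succ n =>
          simp only [List.getElem_cons_succ, List.getElem_drop, List.getElem_take]
          congr 1
          omega
    rw [h2, h1]

-- emission step: with lo, hi at their counts, B's range'-slice equals the filtered tail
lemma emission_eq (l : List Int) (hs : l.Pairwise (· ≤ ·)) (min_sep max_sep : Int)
    (i : Nat) (c1 : Int) :
    (List.range' (max (l.countP (fun x => decide (x < c1 + min_sep))) (i + 1))
        ((l.countP (fun x => decide (x ≤ c1 + max_sep))) -
          max (l.countP (fun x => decide (x < c1 + min_sep))) (i + 1))).map
      (fun j => (c1, l.getD j 0, l.getD j 0 - c1)) =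
    emitAt l min_sep max_sep i c1 := by
  have hp := downClosed_lt (c1 + min_sep)
  have hq := downClosed_le (c1 + max_sep)
  have hst : (l.drop (i + 1)).Pairwise (· ≤ ·) := hs.drop
  unfold emitAt
  rw [filter_and_eq_take_drop hp hq _ hst,
    countP_drop_sorted hp l hs (i + 1), countP_drop_sorted hq l hs (i + 1)]
  set lo := l.countP (fun x => decide (x < c1 + min_sep)) with hlo
  set hi := l.countP (fun x => decide (x ≤ c1 + max_sep)) with hhi
  have hloL : lo ≤ l.length := l.countP_le_length
  have hhiL : hi ≤ l.length := l.countP_le_length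
  clear_value lo hi
  clear hlo hhi
  by_cases hdeg : hi ≤ max lo (i + 1)
  · rw [Nat.sub_eq_zero_of_le hdeg]
    simp only [List.range'_zero, List.map_nil]
    by_cases h1 : hi ≤ i + 1
    · rw [Nat.sub_eq_zero_of_le h1]
      simp
    · have h2 : i + 1 < hi := by omega
      have hmin : min (lo - (i + 1)) (hi - (i + 1)) = hi - (i + 1) := by omega
      rw [hmin]
      have hlen : (((l.drop (i + 1)).take (hi - (i + 1)))).length ≤ hi - (i + 1) := by
        rw [List.length_take]; omega
      rw [List.drop_eq_nil_of_le hlen]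
      simp
  · have hmaxeq : max lo (i + 1) = lo ∨ max lo (i + 1) = i + 1 := max_choice _ _
    have hmax1 : lo ≤ max lo (i + 1) := le_max_left _ _
    have hmax2 : i + 1 ≤ max lo (i + 1) := le_max_right _ _
    set S := max lo (i + 1) with hS
    clear_value S
    clear hS
    have hmin : min (lo - (i + 1)) (hi - (i + 1)) = lo - (i + 1) := by omega
    rw [hmin]
    have hmap : (List.range' S (hi - S)).map
        (fun j => (c1, l.getD j 0, l.getD j 0 - c1)) =
        ((List.range' S (hi - S)).map (fun j => l.getD j 0)).map
          (fun x => (c1, x, x - c1)) := by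
      rw [List.map_map]
      rfl
    rw [hmap, map_getD_range' l (hi - S) S (by omega)]
    have hS1 : S + (hi - S) = hi := by omega
    rw [hS1, List.take_drop, List.drop_drop]
    have hS3 : (i + 1) + (hi - (i + 1)) = hi := by omega
    rw [hS3]
    have hidx : i + 1 + (lo - (i + 1)) = S := by
      rcases hmaxeq with h | h <;> omega
    rw [hidx]

-- A's inner loop is the filtered tail (sorted tail: break = filter)
lemma innerA_eq_filter (c1 min_sep max_sep : Int) :
    ∀ (t : List Int), t.Pairwise (· ≤ ·) →
      innerA c1 min_sep max_sep t =
        (t.filter (fun x => !(decide (x < c1 + min_sep)) && decide (x ≤ c1 + max_sep))).map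
          (fun x => (c1, x, x - c1)) := by
  intro t
  induction t with
  | nil => simp [innerA]
  | cons c2 rest ih =>
    intro hs
    have hst := List.Pairwise.of_cons hs
    rw [innerA]
    by_cases h1 : c2 - c1 < min_sep
    · rw [if_pos h1, ih hst, List.filter_cons, if_neg (by simp; omega)]
    · rw [if_neg h1]
      by_cases h2 : max_sep < c2 - c1
      · rw [if_pos h2]
        have : (c2 :: rest).filter (fun x => !(decide (x < c1 + min_sep)) && decide (x ≤ c1 + max_sep)) = [] := by
          rw [List.filter_eq_nil_iff]
          intro x hx
          rcases List.mem_cons.mp hx with rfl | hxt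
          · simp; omega
          · have : c2 ≤ x := (List.pairwise_cons.mp hs).1 x hxt
            simp; omega
        rw [this]; simp
      · rw [if_neg h2, ih hst, List.filter_cons, if_pos (by simp; omega)]
        simp

-- sortedness of the Cys position list
lemma cys_positions_sorted (cleaned : String) :
    (cys_positions cleaned).Pairwise (· ≤ ·) := by
  unfold cys_positions
  rw [List.pairwise_map]
  exact ((PySem.List.pairwise_lt_enumerate cleaned.toList 0).filter _).imp (fun h => le_of_lt h)

-- B's fold, with the sliding-window invariant
lemma foldB_eq (l : List Int) (hs : l.Pairwise (· ≤ ·)) (min_sep max_sep : Int) :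
    ∀ (ent : List (Int × Nat)) (lo hi : Nat) (acc : List (Int × Int × Int)),
      (∀ e ∈ ent, e.2 < l.length) →
      ent.Pairwise (fun a b => a.1 ≤ b.1) →
      (∀ e ∈ ent, lo ≤ l.countP (fun x => decide (x < e.1 + min_sep))) →
      (∀ e ∈ ent, hi ≤ l.countP (fun x => decide (x ≤ e.1 + max_sep))) →
      (ent.foldl
        (fun (st : Nat × Nat × List (Int × Int × Int)) q =>
          let c1 := q.1
          let i := q.2
          let lo := advanceWhile l (fun x => decide (x < c1 + min_sep)) st.1
          let hi := advanceWhile l (fun x => decide (x ≤ c1 + max_sep)) st.2.1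
          (lo, hi, st.2.2 ++ (List.range' (max lo (i + 1)) (hi - max lo (i + 1))).map
              (fun j => (c1, l.getD j 0, l.getD j 0 - c1))))
        (lo, hi, acc)).2.2 =
      acc ++ ent.flatMap (fun e => emitAt l min_sep max_sep e.2 e.1) := by
  intro ent
  induction ent with
  | nil => intro lo hi acc _ _ _ _; simp
  | cons e rest ih =>
    intro lo hi acc hmem hpair hlo hhi
    obtain ⟨c1, i⟩ := e
    have hp := downClosed_lt (c1 + min_sep)
    have hq := downClosed_le (c1 + max_sep)
    have hilen : i < l.length := hmem _ (List.mem_cons_self)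
    have hadv1 : advanceWhile l (fun x => decide (x < c1 + min_sep)) lo
        = l.countP (fun x => decide (x < c1 + min_sep)) :=
      advanceWhile_eq_countP hp l hs lo (hlo _ (List.mem_cons_self))
    have hadv2 : advanceWhile l (fun x => decide (x ≤ c1 + max_sep)) hi
        = l.countP (fun x => decide (x ≤ c1 + max_sep)) :=
      advanceWhile_eq_countP hq l hs hi (hhi _ (List.mem_cons_self))
    have hhead : ∀ e' ∈ rest, c1 ≤ e'.1 := by
      intro e' he'
      exact (List.pairwise_cons.mp hpair).1 e' he'
    rw [List.foldl_cons]
    simp only [hadv1, hadv2]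
    rw [ih _ _ _
      (fun e' he' => hmem e' (List.mem_cons_of_mem _ he'))
      (List.Pairwise.of_cons hpair)
      (fun e' he' => List.countP_mono_left (fun x _ hx => by
        have := hhead e' he'
        simp at hx ⊢
        omega))
      (fun e' he' => List.countP_mono_left (fun x _ hx => by
        have := hhead e' he'
        simp at hx ⊢
        omega))]
    rw [emission_eq l hs min_sep max_sep i c1]
    rw [List.flatMap_cons, List.append_assoc]

-- the filter-then-map comprehension, as zipIdx facts
lemma mem_zipIdx_lt {l : List Int} {e : Int × Nat} (he : e ∈ l.zipIdx) : e.2 < l.length := by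
  obtain ⟨c, i⟩ := e
  have := List.mem_zipIdx he
  omega

lemma zipIdx_pairwise_fst {l : List Int} (hs : l.Pairwise (· ≤ ·)) :
    l.zipIdx.Pairwise (fun a b => a.1 ≤ b.1) := by
  have h : (l.zipIdx.map Prod.fst).Pairwise (· ≤ ·) := by
    rw [List.zipIdx_map_fst]
    exact hs
  exact (List.pairwise_map.mp h)

-- ===== VERDICT (by name: the statement is the Claim_ definition above) =====
set_option maxHeartbeats 1000000 in
theorem find_cys_pairs_spec : Claim_equal_find_cys_pairs := by
  intro seq min_sep max_sep _
  show find_cys_pairs seq min_sep max_sep = find_cys_pairs_alt seq min_sep max_sep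
  unfold find_cys_pairs find_cys_pairs_alt
  have hs : (cys_positions (clean_seq seq)).Pairwise (· ≤ ·) := cys_positions_sorted _
  set l := cys_positions (clean_seq seq) with hl
  clear_value l
  clear hl
  rw [PySem.List.foldl_append_eq_flatMap]
  rw [foldB_eq l hs min_sep max_sep l.zipIdx 0 0 []
    (fun e he => mem_zipIdx_lt he)
    (zipIdx_pairwise_fst hs)
    (fun e _ => Nat.zero_le _)
    (fun e _ => Nat.zero_le _)]
  simp only [List.nil_append]
  rw [PySem.List.enumerate_eq_zipIdx_map, List.flatMap_map]
  apply List.flatMap_congr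
  intro e he
  obtain ⟨c1, i⟩ := e
  have hslice : PySem.List.slice l (some ((0 + (i : Int)) + 1)) none = l.drop (i + 1) := by
    rw [PySem.List.slice_from l (by omega)]
    congr 1
    omega
  rw [hslice]
  rw [innerA_eq_filter c1 min_sep max_sep _ hs.drop]
  unfold emitAt
  rfl
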